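/- GENERATED by mk_final_copies.py from the proof of the farm's unit `codebook_decode_deinterleave_repeat.2d` (farm:codebook_decode_deinterleave_repeat.2d.1: Lemmas.lean) as the
   re-elaboration sweep compiled it — do not edit. -/
import Asan.CheckWalk
import Vorbis.Spec.ReaderLemmas
import Vorbis.Spec.Units.codebook_decode_deinterleave_repeat_2d

/-!
  Lemmas of unit `codebook_decode_deinterleave_repeat.2d` (10DECFH – 10DF2BH):
  * the bit-level forms of the clamp (C lines 1917 – 1918, FIX 5 / FIX 10) and of `z *= c->dimensions` (line 1936) as numbers;
  * what `hz : DecodeRawResult …` and the sign test 10DECFH say of `z`;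
  * `Deint.Common` / `Deint.Locals` after stores into the function's own frame below the slot of `p_inter` (the return addresses
    of the two check calls at `[rsp−8]`, the slot `[rsp+4]`): `Common.carry_wins` for ONE stack window.
-/

open X86 X86.User Asan Vorbis Vorbis.Spec Vorbis.Spec.Deint

namespace Vorbis.Spec.codebook_decode_deinterleave_repeat_2d

/-! ### The clamp and the product as numbers -/

/-- `p_inter * ch + c_inter` as the code computes it (`imul eax, esi ; add eax, ebp`) is the dword of the number. -/
theorem pos_bv (pi ch ci : Nat) :
    BitVec.ofNat 32 pi * BitVec.ofNat 32 ch + Word.part .w32 (UInt64.ofNat ci) = BitVec.ofNat 32 (pi * ch + ci) := by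
  rw [cnt32_part, ← BitVec.ofNat_mul, ← BitVec.ofNat_add]

/-- `len * ch` as the code computes it (`imul esi, [rsp+70H]`, esi = ch) is the dword of the number. -/
theorem lim_bv (ch len : Nat) : BitVec.ofNat 32 ch * BitVec.ofNat 32 len = BitVec.ofNat 32 (len * ch) := by
  rw [← BitVec.ofNat_mul, Nat.mul_comm]

/-- `lea ecx, [rax + r15]`: the low dword of the 64-bit sum is the dword of the sum of the numbers. -/
theorem sum_bv (pos eff : Nat) :
    BitVec.setWidth 32 (Word.ofBV (BitVec.ofNat 32 pos) + UInt64.ofNat eff).toBitVec = BitVec.ofNat 32 (pos + eff) := by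
  apply BitVec.eq_of_toNat_eq
  rw [BitVec.toNat_setWidth, UInt64.toNat_toBitVec, UInt64.toNat_add, Vorbis.toNat_ofBV32, BitVec.toNat_ofNat,
    UInt64.toNat_ofNat', BitVec.toNat_ofNat]
  omega

/-- **`cmp ecx, esi ; jle`** (C line 1917 `if (pos + effective > len * ch)`, signed): with `pos`, `len·ch ≤ 65536` and
`effective ≤ 65535` nothing wraps and the signed comparison is the comparison of the numbers. -/
theorem clamp_cmp (pos lim eff : Nat) (hpos : pos ≤ 65536) (hlim : lim ≤ 65536) (heff : eff ≤ 65535) :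
    (BitVec.setWidth 32 (Word.ofBV (BitVec.ofNat 32 pos) + UInt64.ofNat eff).toBitVec).toInt ≤ (BitVec.ofNat 32 lim).toInt ↔
      pos + eff ≤ lim := by
  rw [sum_bv, cnt32_toInt _ (by omega), cnt32_toInt _ (by omega)]
  omega

/-- **`sub edx, eax`** (FIX 5: `effective = len*ch - (p_inter*ch + c_inter)`): `pos ≤ len·ch`, so the difference is the number. -/
theorem clamp_sub (pos lim : Nat) (hle : pos ≤ lim) (hlim : lim ≤ 65536) :
    BitVec.ofNat 32 lim - BitVec.ofNat 32 pos = BitVec.ofNat 32 (lim - pos) :=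
  BitVec.ofNat_sub_ofNat_of_le lim pos (by omega) hle

/-- **`test edx, edx ; jle`** (FIX 10: `if (effective <= 0) return FALSE`) on a small number: taken exactly when it is 0. -/
theorem clamp_test (n : Nat) (hn : n ≤ 65536) :
    ((BitVec.ofNat 32 n).toNat = 0 ∨ (BitVec.ofNat 32 n).msb = true) ↔ n = 0 := by
  have e : (BitVec.ofNat 32 n).toNat = n := toNat_ofNat32 n (by omega)
  have hm : (BitVec.ofNat 32 n).msb = false := by
    rw [BitVec.msb_eq_false_iff_two_mul_lt, e]
    omega
  rw [e, hm]
  simp only [Bool.false_eq_true, or_false]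

/-- **`imul r14d, [r12]`** (C line 1936 `z *= c->dimensions`): a dword times the dword of a number is the dword of the product. -/
theorem zdim_bv (x : BitVec 32) (d : Nat) : x * BitVec.ofNat 32 d = BitVec.ofNat 32 (x.toNat * d) := by
  rw [BitVec.ofNat_mul, BitVec.ofNat_toNat, BitVec.setWidth_eq]

/-- A dword whose sign bit is clear: its signed value is its unsigned value. -/
theorem toInt_of_msb_false (x : BitVec 32) (h : x.msb = false) : x.toInt = (x.toNat : Int) := by
  rw [BitVec.msb_eq_false_iff_two_mul_lt] at h
  rw [BitVec.toInt_eq_toNat_cond, if_pos h]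

/-! ### `z` after the sign test -/

/-- **`z` after `test r14d, r14d ; js` was not taken** (10DECFH, C line 1907): the DECODE_RAW result in r14d is an index
`z < N(c)`, and `z·dimensions + dimensions` does not wrap 32 bits (K6 / FIX 3). `z` is the low dword of r14 as a number. -/
theorem z_facts {Blk : Block → Prop} {e : State} (r14 : Word) (hcb : CodebookOK Blk e.mem (cOf e))
    (ht : Codebook.lookup_type e.mem (cOf e) = 2) (hz : DecodeRawResult e.mem (cOf e) (s32 r14))
    (hm : (Word.part .w32 r14).msb = false) :
    (Word.part .w32 r14).toNat + 1 ≤ nOf e ∧ (Word.part .w32 r14).toNat * dimOf e + dimOf e ≤ 0x20000000 := by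
  have e1 : s32 r14 = ((Word.part .w32 r14).toNat : Int) := toInt_of_msb_false _ hm
  rw [e1] at hz
  generalize (Word.part .w32 r14).toNat = z at hz ⊢
  have hlt : (z : Int) < Codebook.N e.mem (cOf e) := by
    rcases hz with h1 | h2
    · omega
    · exact h2.2
  have hd1 := hcb.K1.dim_pos
  have hidx := hcb.multiplicands_index_lt ht z (dimOf e - 1) hlt (by
    simp only [dimOf]
    omega)
  simp only [dimOf, nOf] at hidx ⊢
  constructor
  · omega
  · omega

/-- **The `Round` of an arm** from the loop invariant, the clamp's result (`Res.clamp_ok`) and `z < N(c)`. -/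
theorem round_of {e : State} {ci pi eff eff' z : Nat} {td : Int}
    (hinv : Res.DeintInv ci pi (chOf e) (lenOf e) eff (dimOf e)) (htd : 1 ≤ td) (h1 : 1 ≤ eff') (h2 : eff' ≤ eff)
    (h3 : pi * chOf e + ci + eff' ≤ lenOf e * chOf e) (hz : z + 1 ≤ nOf e) :
    Round e ci pi eff' (z * dimOf e) td := by
  have hle := hinv.eff_le
  refine ⟨hinv.inter, h1, by omega, h3, ?_, htd⟩
  have hm : (z + 1) * dimOf e ≤ nOf e * dimOf e := Nat.mul_le_mul_right _ hz
  rw [Nat.add_mul, Nat.one_mul] at hm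
  omega

/-! ### `Common` and `Locals` after stores into the own frame below the slot of `p_inter` -/

/-- **`Common` after stores inside the function's own stack area below the slot of `p_inter`** (`[e.rsp − 496, e.rsp − 96)`: the
return address of a check call at `[rsp−8]`, the slot `[rsp+4]`): `Common.carry_wins` for that one window; the spill slot of `f`
and `*f` are off it. -/
theorem common_frame {others : List Obj} {frames : List (Nat × FrameLayout)} {Blk : Block → Prop} {len : Nat} {u₀ : State}
    {ret : Word} {e u s : State} (hcom : Common others frames Blk len u₀ ret e u) (g : DeintGeo e)
    (hs : Mem.SameExcept [⟨(e.reg .rsp).toNat - 496, (e.reg .rsp).toNat - 96⟩] u.mem s.mem)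
    (hrsp : s.reg .rsp = e.reg .rsp - 104) (hr12 : s.reg .r12 = u.reg .r12) (hab : abiInv s) :
    Common others frames Blk len u₀ ret e s := by
  have hlo := g.sp_lo
  have hhi := g.sp_hi
  have gf1 := g.f_st
  have hW : ∀ w, w ∈ [(⟨(e.reg .rsp).toNat - 496, (e.reg .rsp).toNat - 96⟩ : Span)] → CarryWin others frames Blk len e w := by
    intro w hw
    rw [List.mem_singleton] at hw
    subst hw
    refine CarryWin.of_stack g _ (Nat.le_refl _) (Or.inl ?_)
    simp only []
    omega
  have hfs : UInt64.ofNat (s.mem.readLE (e.reg .rsp - 80) 8) = e.reg .rdi := by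
    have r : s.mem.readLE (e.reg .rsp - 80) 8 = u.mem.readLE (e.reg .rsp - 80) 8 := by
      apply hs.readLE
      · u_omega
      · intro w hw
        rw [List.mem_singleton] at hw
        subst hw
        simp only []
        u_omega
    rw [r]
    exact hcom.fSlot
  have hrd : ReaderPost Blk len e.mem s.mem (fOf e) := by
    apply hcom.reader_off g hs
    intro w hw
    rw [List.mem_singleton] at hw
    subst hw
    simp only []
    omega
  exact Common.carry_wins hcom g hs hW hrsp (hr12.trans hcom.c) hfs hrd hab

/-- **`Locals` after the same stores**: ebp kept, r15d = the (clamped) `effective`, the slot of `p_inter` `[rsp+8]` and the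
argument slot of `total_decode` `[rsp+78H]` are off the window. -/
theorem locals_frame {e u s : State} {ci pi eff eff' : Nat} {td : Int} (hloc : Locals e u ci pi eff td) (g : DeintGeo e)
    (hs : Mem.SameExcept [⟨(e.reg .rsp).toNat - 496, (e.reg .rsp).toNat - 96⟩] u.mem s.mem)
    (hrbp : s.reg .rbp = u.reg .rbp) (hr15 : s.reg .r15 = UInt64.ofNat eff') :
    Locals e s ci pi eff' td := by
  have hlo := g.sp_lo
  have hhi := g.sp_hi
  refine ⟨hrbp.trans hloc.ciReg, ?_, hr15, ?_⟩
  · have r : s.mem.readLE (e.reg .rsp - 96) 4 = u.mem.readLE (e.reg .rsp - 96) 4 := by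
      apply hs.readLE
      · u_omega
      · intro w hw
        rw [List.mem_singleton] at hw
        subst hw
        simp only []
        u_omega
    rw [r]
    exact hloc.piSlot
  · have r : s.mem.readLE (e.reg .rsp + 16) 4 = u.mem.readLE (e.reg .rsp + 16) 4 := by
      apply hs.readLE
      · u_omega
      · intro w hw
        rw [List.mem_singleton] at hw
        subst hw
        simp only []
        u_omega
    rw [r]
    exact hloc.tdSlot

end Vorbis.Spec.codebook_decode_deinterleave_repeat_2d
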